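-- pv_equiv track=rewrite | github.com/gimli-org/gimli | python/pygimli/utils/sparseMat2Numpy.py | convertCRSIndex2Map
-- ===== SOURCE A (Python) =====
-- def convertCRSIndex2Map(rowIdx, colPtr):
--     """Converts CRS indices to uncompressed indices (row, col)."""
--     ii = []
--     jj = []
--     for i in range(len(colPtr)-1):
--         for j in range(colPtr[i], colPtr[i + 1]):
--             ii.append(i)
--             jj.append(rowIdx[j])
--     return ii, jj
-- ===== SOURCE B (Python) =====
-- def convertCRSIndex2Map(rowIdx, colPtr):
--     """Converts CRS indices to uncompressed indices (row, col)."""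
--     ii = []
--     jj = []
--     for i, (a, b) in enumerate(zip(colPtr, colPtr[1:])):
--         if a < b:
--             ii += [i] * (b - a)
--             jj += rowIdx[a:b]
--     return ii, jj
-- ===== Notes on version B (the rewrite author's own statement) =====
-- stated objective: faster
-- what changed: Removes A's element-by-element inner loop: B pairs colPtr with its shifted self and, per nonempty segment, appends a whole block at once via list replication [i]*(b-a) for the rows and a slice rowIdx[a:b] for the columns, moving the per-element work into C-level bulk operations.
-- outside the precondition, e.g. on convertCRSIndex2Map([5, 7], [-1, 1]): A returns ([0, 0], [7, 5]), B returns ([0, 0], [])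
import Mathlib
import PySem

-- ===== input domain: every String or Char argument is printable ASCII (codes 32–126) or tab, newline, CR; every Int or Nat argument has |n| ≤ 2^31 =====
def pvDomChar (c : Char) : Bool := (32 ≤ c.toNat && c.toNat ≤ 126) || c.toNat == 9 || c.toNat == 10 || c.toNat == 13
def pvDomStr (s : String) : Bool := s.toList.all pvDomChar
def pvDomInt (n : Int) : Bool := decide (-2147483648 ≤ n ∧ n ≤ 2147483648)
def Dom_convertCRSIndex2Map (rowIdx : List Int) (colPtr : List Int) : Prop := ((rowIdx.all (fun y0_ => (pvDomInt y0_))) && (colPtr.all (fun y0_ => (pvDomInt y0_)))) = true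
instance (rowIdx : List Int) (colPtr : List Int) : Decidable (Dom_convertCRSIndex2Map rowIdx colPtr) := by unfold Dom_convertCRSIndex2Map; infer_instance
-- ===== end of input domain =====

-- B removes A's element-by-element inner loop, appending per segment a replicated row block and a
-- slice of rowIdx (idiomatic); return value only, no mutation involved.

-- ===== PORT A =====
-- literal port of A: fused double loop over i in range(len(colPtr)-1), j in range(colPtr[i], colPtr[i+1]),
-- appending to both accumulators; rowIdx[j] is PySem.List.pyGetD (exact under Pre_, which excludes IndexError)
def convertCRSIndex2Map (rowIdx : List Int) (colPtr : List Int) : List Int × List Int :=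
  (List.range (colPtr.length - 1)).foldl
    (fun (acc : List Int × List Int) (i : Nat) =>
      (PySem.List.pyRange (colPtr.getD i 0) (colPtr.getD (i + 1) 0) 1).foldl
        (fun (acc2 : List Int × List Int) (j : Int) =>
          (acc2.1 ++ [(i : Int)], acc2.2 ++ [PySem.List.pyGetD rowIdx j 0])) acc)
    ([], [])

-- ===== PORT B =====
-- literal port of Source B: one loop over enumerate(zip(colPtr, colPtr[1:])); per nonempty segment it
-- appends [i]*(b-a) (List.replicate) to ii and the slice rowIdx[a:b] (PySem.List.slice) to jj
def convertCRSIndex2Map_alt (rowIdx : List Int) (colPtr : List Int) : List Int × List Int :=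
  (PySem.List.enumerate (colPtr.zip (PySem.List.slice colPtr (some 1) none)) 0).foldl
    (fun (acc : List Int × List Int) (p : Int × (Int × Int)) =>
      if p.2.1 < p.2.2 then
        (acc.1 ++ List.replicate (p.2.2 - p.2.1).toNat p.1,
         acc.2 ++ PySem.List.slice rowIdx (some p.2.1) (some p.2.2))
      else acc)
    ([], [])

-- ===== PRECONDITION & SPEC =====
-- Pre_ excludes the inputs on which A raises IndexError (a nonempty segment reaching outside
-- rowIdx's valid Python index range), and additionally the inputs where a nonempty segment starts
-- at a NEGATIVE column pointer: there the CRS pointers are meaningless and A's negative-index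
-- wraparound is as accidental as B's slice clamping — neither value is the specifiable one.
def Pre_convertCRSIndex2Map (rowIdx : List Int) (colPtr : List Int) : Prop :=
  ∀ i ∈ List.range (colPtr.length - 1),
    colPtr.getD i 0 < colPtr.getD (i + 1) 0 →
      (0 ≤ colPtr.getD i 0 ∧ colPtr.getD (i + 1) 0 ≤ (rowIdx.length : Int))
instance (rowIdx : List Int) (colPtr : List Int) : Decidable (Pre_convertCRSIndex2Map rowIdx colPtr) := by
  unfold Pre_convertCRSIndex2Map; infer_instance

def pvWitness_convertCRSIndex2Map : List Int × List Int := ([5, 7, 9], [0, 2, 3])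

def Spec_convertCRSIndex2Map (rowIdx : List Int) (colPtr : List Int) (out : List Int × List Int) : Prop := out = convertCRSIndex2Map_alt rowIdx colPtr
instance (rowIdx : List Int) (colPtr : List Int) (out : List Int × List Int) : Decidable (Spec_convertCRSIndex2Map rowIdx colPtr out) := by unfold Spec_convertCRSIndex2Map; infer_instance

-- ===== CLAIM (what is proved, stated in full; the proofs are below) =====
def Claim_equal_convertCRSIndex2Map : Prop := ∀ (rowIdx : List Int) (colPtr : List Int), Dom_convertCRSIndex2Map rowIdx colPtr → Pre_convertCRSIndex2Map rowIdx colPtr → Spec_convertCRSIndex2Map rowIdx colPtr (convertCRSIndex2Map rowIdx colPtr)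

-- ===== LEMMAS AND PROOFS =====

-- inner loop of A: appending singletons to both components is a map on each component
theorem pvInnerFold (L : List Int) (f g : Int → Int) (x y : List Int) :
    L.foldl (fun (acc2 : List Int × List Int) (j : Int) => (acc2.1 ++ [f j], acc2.2 ++ [g j])) (x, y)
      = (x ++ L.map f, y ++ L.map g) := by
  induction L generalizing x y with
  | nil => simp
  | cons a t ih => simp [List.foldl_cons, ih]

-- outer loop of A: componentwise append-fold over range n is a pair of flatMaps
theorem pvOuterFold (n : Nat) (F G : Nat → List Int) (x y : List Int) :
    (List.range n).foldl (fun (acc : List Int × List Int) (i : Nat) => (acc.1 ++ F i, acc.2 ++ G i)) (x, y)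
      = (x ++ (List.range n).flatMap F, y ++ (List.range n).flatMap G) := by
  induction n generalizing x y with
  | zero => simp
  | succ m ih => simp [List.range_succ, ih]

-- B's loop: a guarded pair-append fold is a pair of guarded flatMaps
theorem pvCondFold {α : Type} (l : List α) (C : α → Prop) [DecidablePred C] (F G : α → List Int) (x y : List Int) :
    l.foldl (fun (acc : List Int × List Int) (p : α) =>
        if C p then (acc.1 ++ F p, acc.2 ++ G p) else acc) (x, y)
      = (x ++ l.flatMap (fun p => if C p then F p else []),
         y ++ l.flatMap (fun p => if C p then G p else [])) := by
  induction l generalizing x y with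
  | nil => simp
  | cons a t ih =>
    by_cases h : C a <;> simp [List.foldl_cons, h, ih]

theorem pvFlatMapCongr {α β : Type} (l : List α) (f g : α → List β)
    (h : ∀ a ∈ l, f a = g a) : l.flatMap f = l.flatMap g := by
  induction l with
  | nil => rfl
  | cons a t ih => simp [List.flatMap_cons, h a (by simp), ih (fun b hb => h b (by simp [hb]))]

theorem pvFlatMapMap {α β γ : Type} (l : List α) (f : α → β) (g : β → List γ) :
    List.flatMap g (l.map f) = l.flatMap (fun a => g (f a)) := by
  induction l with
  | nil => rfl
  | cons a t ih => simp [List.flatMap_cons, ih]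

theorem pvZipGet (colPtr : List Int) (i : Nat) (h : i ∈ List.range (colPtr.length - 1)) :
    (colPtr.zip colPtr.tail).getD i (0, 0) = (colPtr.getD i 0, colPtr.getD (i + 1) 0) := by
  rw [List.mem_range] at h
  have h1 : i < colPtr.length := by omega
  have h2 : i + 1 < colPtr.length := by omega
  have hz : i < (colPtr.zip colPtr.tail).length := by simp [List.length_zip, List.length_tail]; omega
  rw [List.getD_eq_getElem _ _ hz, List.getElem_zip, List.getD_eq_getElem _ _ h1,
    List.getD_eq_getElem _ _ h2]
  congr 1
  rw [List.getElem_tail]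

-- per-segment gather: under 0 ≤ a < b ≤ |xs|, mapping xs[j] over range(a,b) IS the slice xs[a:b]
theorem pvGather (xs : List Int) (a b : Int) (h0 : 0 ≤ a) (hab : a < b) (hb : b ≤ (xs.length : Int)) :
    (PySem.List.pyRange a b 1).map (fun j => PySem.List.pyGetD xs j 0)
      = PySem.List.slice xs (some a) (some b) := by
  rw [PySem.List.slice_toNat xs h0 (by omega), PySem.List.pyRange_one, List.map_map]
  apply List.ext_getElem
  · simp; omega
  · intro k hk1 hk2
    simp only [List.getElem_map, List.getElem_range, Function.comp]
    have hk : (k : Int) < b - a := by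
      have := hk1; simp at this; omega
    have hin : 0 ≤ a + (k : Int) := by omega
    have hlt : a + (k : Int) < (xs.length : Int) := by omega
    rw [PySem.List.pyGetD_eq_getElem xs 0 hin hlt, List.getElem_take, List.getElem_drop]
    congr 1
    omega

-- per-segment row block: mapping the constant i over range(a,b) is replicate (b-a).toNat i
theorem pvRowBlock (a b i : Int) :
    (PySem.List.pyRange a b 1).map (fun _ => i) = List.replicate (b - a).toNat i := by
  rw [List.map_const', PySem.List.length_pyRange_one]

theorem convertCRSIndex2Map_eq (rowIdx : List Int) (colPtr : List Int)
    (hpre : Pre_convertCRSIndex2Map rowIdx colPtr) :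
    convertCRSIndex2Map rowIdx colPtr = convertCRSIndex2Map_alt rowIdx colPtr := by
  unfold convertCRSIndex2Map convertCRSIndex2Map_alt
  have hslice : PySem.List.slice colPtr (some 1) none = colPtr.tail := by
    simpa using PySem.List.slice_from_natCast colPtr 1
  rw [hslice]
  set segs := colPtr.zip colPtr.tail with hsegs
  have hlen : segs.length = colPtr.length - 1 := by
    simp [hsegs, List.length_zip, List.length_tail]
  -- A's fused fold = a pair of flatMaps over range
  have hA :
      (List.range (colPtr.length - 1)).foldl
        (fun (acc : List Int × List Int) (i : Nat) =>
          (PySem.List.pyRange (colPtr.getD i 0) (colPtr.getD (i + 1) 0) 1).foldl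
            (fun (acc2 : List Int × List Int) (j : Int) =>
              (acc2.1 ++ [(i : Int)], acc2.2 ++ [PySem.List.pyGetD rowIdx j 0])) acc)
        (([], []) : List Int × List Int)
      = ((List.range (colPtr.length - 1)).flatMap
            (fun i => (PySem.List.pyRange (colPtr.getD i 0) (colPtr.getD (i + 1) 0) 1).map
              (fun _ => (i : Int))),
         (List.range (colPtr.length - 1)).flatMap
            (fun i => (PySem.List.pyRange (colPtr.getD i 0) (colPtr.getD (i + 1) 0) 1).map
              (fun j => PySem.List.pyGetD rowIdx j 0))) := by
    have hfun : (fun (acc : List Int × List Int) (i : Nat) =>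
            (PySem.List.pyRange (colPtr.getD i 0) (colPtr.getD (i + 1) 0) 1).foldl
              (fun (acc2 : List Int × List Int) (j : Int) =>
                (acc2.1 ++ [(i : Int)], acc2.2 ++ [PySem.List.pyGetD rowIdx j 0])) acc)
        = (fun (acc : List Int × List Int) (i : Nat) =>
            (acc.1 ++ (PySem.List.pyRange (colPtr.getD i 0) (colPtr.getD (i + 1) 0) 1).map (fun _ => (i : Int)),
             acc.2 ++ (PySem.List.pyRange (colPtr.getD i 0) (colPtr.getD (i + 1) 0) 1).map (fun j => PySem.List.pyGetD rowIdx j 0))) := by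
      funext acc i; exact pvInnerFold _ _ _ acc.1 acc.2
    rw [hfun, pvOuterFold]; simp
  rw [hA]
  -- B's guarded fold = a pair of guarded flatMaps over enumerate segs
  rw [pvCondFold (α := Int × (Int × Int)) (PySem.List.enumerate segs 0)
      (fun p => p.2.1 < p.2.2)
      (fun p => List.replicate (p.2.2 - p.2.1).toNat p.1)
      (fun p => PySem.List.slice rowIdx (some p.2.1) (some p.2.2)) [] []]
  have henum : PySem.List.enumerate segs 0
      = (PySem.List.pyRange 0 (segs.length : Int) 1).map
          (fun j => (j, PySem.List.pyGetD segs j (0, 0))) := by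
    simpa using PySem.List.enumerate_eq_map_pyRange segs (0, 0)
  rw [henum, PySem.List.pyRange_zero_natCast, hlen]
  simp only [pvFlatMapMap, List.nil_append]
  refine Prod.ext ?_ ?_
  · -- ii components
    dsimp only
    apply pvFlatMapCongr
    intro i hi
    have hz : segs.getD i (0, 0) = (colPtr.getD i 0, colPtr.getD (i + 1) 0) := pvZipGet colPtr i hi
    simp only [PySem.List.pyGetD_natCast, hz]
    by_cases hab : colPtr.getD i 0 < colPtr.getD (i + 1) 0
    · rw [if_pos hab, pvRowBlock]
    · rw [if_neg hab, PySem.List.pyRange_one_eq_nil (by omega)]; rfl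
  · -- jj components
    dsimp only
    apply pvFlatMapCongr
    intro i hi
    have hz : segs.getD i (0, 0) = (colPtr.getD i 0, colPtr.getD (i + 1) 0) := pvZipGet colPtr i hi
    simp only [PySem.List.pyGetD_natCast, hz]
    by_cases hab : colPtr.getD i 0 < colPtr.getD (i + 1) 0
    · obtain ⟨h0, hb⟩ := hpre i hi hab
      rw [if_pos hab, pvGather rowIdx _ _ h0 hab hb]
    · rw [if_neg hab, PySem.List.pyRange_one_eq_nil (by omega)]; rfl

-- ===== VERDICT (by name: the statement is the Claim_ definition above) =====
theorem convertCRSIndex2Map_spec : Claim_equal_convertCRSIndex2Map := by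
  intro rowIdx colPtr _ hpre
  exact convertCRSIndex2Map_eq rowIdx colPtr hpre
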